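-- pv_equiv track=rewrite | github.com/ml-maple-monk/training-signal-processing | src/training_signal_processing/pipelines/source_cleaning/submission.py | glob_listing_prefix
-- ===== SOURCE A (Python) =====
-- def glob_listing_prefix(pattern: str) -> str:
--     wildcard_positions = [
--         position
--         for token in ("*", "?", "[")
--         if (position := pattern.find(token)) != -1
--     ]
--     if not wildcard_positions:
--         slash_index = pattern.rfind("/")
--         return pattern[: slash_index + 1] if slash_index >= 0 else pattern
--     prefix = pattern[: min(wildcard_positions)]
--     slash_index = prefix.rfind("/")
--     return prefix[: slash_index + 1] if slash_index >= 0 else ""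
-- ===== SOURCE B (Python) =====
-- def glob_listing_prefix(pattern: str) -> str:
--     last_slash = -1
--     hit = False
--     for i, ch in enumerate(pattern):
--         if ch in "*?[":
--             hit = True
--             break
--         if ch == "/":
--             last_slash = i
--     if last_slash >= 0:
--         return pattern[: last_slash + 1]
--     return "" if hit else pattern
-- ===== Notes on version B (the rewrite author's own statement) =====
-- stated objective: alternative
-- what changed: Replaces the three find() calls, the min over their positions and the rfind() on the sliced prefix with a single left-to-right scan that tracks the last slash seen before the first wildcard and a hit flag.
import Mathlib
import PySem

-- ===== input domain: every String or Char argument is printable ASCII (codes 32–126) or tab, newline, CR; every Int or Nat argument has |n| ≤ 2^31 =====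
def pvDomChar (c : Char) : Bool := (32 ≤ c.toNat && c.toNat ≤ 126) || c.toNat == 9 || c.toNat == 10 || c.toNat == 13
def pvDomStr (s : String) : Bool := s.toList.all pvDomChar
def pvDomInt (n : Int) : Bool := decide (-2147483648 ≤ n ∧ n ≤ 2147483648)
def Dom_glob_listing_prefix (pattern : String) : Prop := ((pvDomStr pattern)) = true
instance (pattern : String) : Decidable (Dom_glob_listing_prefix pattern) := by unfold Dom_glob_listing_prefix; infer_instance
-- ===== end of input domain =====

-- B replaces A's three find() passes + min + rfind on a slice by a single left-to-right scan
-- tracking the last slash before the first wildcard (same cost; different decomposition).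


-- ===== PORT A =====
-- the list comprehension building wildcard_positions
def pvWildPositions (pattern : String) : List Int :=
  (["*", "?", "["] : List String).foldl
    (fun acc token =>
      let position := PySem.Str.find pattern token
      if position ≠ -1 then acc ++ [position] else acc) []

def glob_listing_prefix (pattern : String) : String :=
  let wildcard_positions := pvWildPositions pattern
  if wildcard_positions = [] then
    let slash_index := PySem.Str.rfind pattern "/"
    if slash_index ≥ 0 then PySem.Str.slice pattern none (some (slash_index + 1)) else pattern
  else
    -- min(wildcard_positions): list is non-empty here, so min? is some; .getD 0 extracts it
    let pfx := PySem.Str.slice pattern none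
      (some ((PySem.List.min? wildcard_positions (fun x => x)).getD 0))
    let slash_index := PySem.Str.rfind pfx "/"
    if slash_index ≥ 0 then PySem.Str.slice pfx none (some (slash_index + 1)) else ""

-- ===== PORT B =====
-- the for-loop: walks the characters with their index, keeping last_slash; breaks on a wildcard
def globScanGo : List Char → Int → Int → Int × Bool
  | [], _, last => (last, false)
  | c :: cs, i, last =>
      if c == '*' || c == '?' || c == '[' then (last, true)
      else if c == '/' then globScanGo cs (i + 1) i
      else globScanGo cs (i + 1) last

def glob_listing_prefix_alt (pattern : String) : String :=
  let r := globScanGo pattern.toList 0 (-1)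
  if r.1 ≥ 0 then PySem.Str.slice pattern none (some (r.1 + 1))
  else if r.2 then "" else pattern

-- ===== PRECONDITION & SPEC =====
def Spec_glob_listing_prefix (pattern : String) (out : String) : Prop := out = glob_listing_prefix_alt pattern
instance (pattern : String) (out : String) : Decidable (Spec_glob_listing_prefix pattern out) := by unfold Spec_glob_listing_prefix; infer_instance

-- ===== CLAIM (what is proved, stated in full; the proofs are below) =====
def Claim_equal_glob_listing_prefix : Prop := ∀ (pattern : String), Dom_glob_listing_prefix pattern → Spec_glob_listing_prefix pattern (glob_listing_prefix pattern)

-- ===== LEMMAS AND PROOFS =====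

def pvWild (c : Char) : Bool := c == '*' || c == '?' || c == '['

def pvLastSlash : List Char → Option Nat
  | [] => none
  | c :: t =>
      match pvLastSlash t with
      | some j => some (j + 1)
      | none => if c == '/' then some 0 else none

def pvToInt : Option Nat → Int
  | none => -1
  | some j => (j : Int)

def pvMinOpt : Option Nat → Option Nat → Option Nat
  | none, b => b
  | some a, none => some a
  | some a, some b => some (min a b)

def pvPfx (cs : List Char) : List Char :=
  match List.findIdx? pvWild cs with
  | some m => cs.take m
  | none => cs

theorem pv_find_go_single (c : Char) : ∀ (cs : List Char) (k : Nat),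
    PySem.Chars.find.go [c] cs k =
      match List.findIdx? (· == c) cs with
      | some i => ((k + i : Nat) : Int)
      | none => -1 := by
  intro cs
  induction cs with
  | nil => intro k; simp [PySem.Chars.find.go]
  | cons h t ih =>
      intro k
      rw [PySem.Chars.find.go]
      by_cases hc : h = c
      · subst hc; simp [List.isPrefixOf, List.findIdx?_cons]
      · have : (c == h) = false := by simp [Ne.symm hc]
        simp [List.isPrefixOf, this, List.findIdx?_cons, beq_iff_eq, hc, ih]
        cases hfi : List.findIdx? (· == c) t with
        | none => simp
        | some i => simp; ring

theorem pv_find_single (cs : List Char) (c : Char) :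
    PySem.Chars.find cs [c] =
      match List.findIdx? (· == c) cs with
      | some i => (i : Int)
      | none => -1 := by
  rw [PySem.Chars.find, pv_find_go_single]
  cases List.findIdx? (· == c) cs <;> simp

theorem pv_ls_append (l : List Char) (c : Char) :
    pvLastSlash (l ++ [c]) = if c == '/' then some l.length else pvLastSlash l := by
  induction l with
  | nil => simp [pvLastSlash]
  | cons h t ih =>
      simp only [List.cons_append, pvLastSlash, ih]
      by_cases hc : c == '/'
      · simp [hc]
      · simp [hc]

theorem pv_rfind_go (s : List Char) : ∀ (j : Nat),
    PySem.Chars.rfind.go s ['/'] j = pvToInt (pvLastSlash (s.take (j + 1))) := by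
  intro j
  induction j with
  | zero =>
      rw [PySem.Chars.rfind.go]
      cases s with
      | nil => simp [pvLastSlash, pvToInt, List.isPrefixOf]
      | cons h t =>
          by_cases hc : h = '/'
          · subst hc; simp [List.isPrefixOf, pvLastSlash, pvToInt]
          · have e1 : ('/' == h) = false := by simp [Ne.symm hc]
            have e2 : (h == '/') = false := by simp [hc]
            simp [List.isPrefixOf, e1, e2, pvLastSlash, pvToInt]
  | succ j ih =>
      rw [PySem.Chars.rfind.go]
      by_cases hlt : j + 1 < s.length
      · rw [List.drop_eq_getElem_cons hlt]
        rw [List.take_add_one (l := s) (i := j + 1)]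
        have hg : s[j+1]?.toList = [s[j+1]] := by
          simp [List.getElem?_eq_getElem hlt]
        rw [hg, pv_ls_append]
        have hlen : (s.take (j + 1)).length = j + 1 := by
          simp; omega
        by_cases hc : s[j+1] = '/'
        · simp [List.isPrefixOf, hc, hlen, pvToInt]
        · have e1 : ('/' == s[j+1]) = false := by simp [Ne.symm hc]
          have e2 : (s[j+1] == '/') = false := by simp [hc]
          simp [List.isPrefixOf, e1, e2, ih]
      · have h1 : s.drop (j + 1) = [] := by
          apply List.drop_eq_nil_of_le; omega
        have h2 : s.take (j + 1 + 1) = s := by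
          apply List.take_of_length_le; omega
        have h3 : s.take (j + 1) = s := by
          apply List.take_of_length_le; omega
        rw [h1, h2]
        simp only [List.isPrefixOf]
        rw [ih, h3]
        simp

theorem pv_rfind_single (cs : List Char) :
    PySem.Chars.rfind cs ['/'] = pvToInt (pvLastSlash cs) := by
  rw [PySem.Chars.rfind, pv_rfind_go]
  congr 1
  congr 1
  apply List.take_of_length_le; omega

theorem pv_triple (cs : List Char) :
    List.findIdx? pvWild cs =
      pvMinOpt (pvMinOpt (List.findIdx? (· == '*') cs) (List.findIdx? (· == '?') cs))
        (List.findIdx? (· == '[') cs) := by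
  induction cs with
  | nil => simp [pvMinOpt]
  | cons h t ih =>
      simp only [List.findIdx?_cons]
      by_cases h1 : h == '*'
      · have : pvWild h = true := by simp [pvWild, h1]
        have h2 : (h == '?') = false := by
          simp only [beq_iff_eq] at h1 ⊢; subst h1; decide
        have h3 : (h == '[') = false := by
          simp only [beq_iff_eq] at h1 ⊢; subst h1; decide
        simp only [this, h1, h2, h3, if_true]
        cases List.findIdx? (· == '?') t <;> cases List.findIdx? (· == '[') t <;>
          simp [pvMinOpt]
      · by_cases h2 : h == '?'
        · have : pvWild h = true := by simp [pvWild, h2]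
          have h3 : (h == '[') = false := by
            simp only [beq_iff_eq] at h2 ⊢; subst h2; decide
          simp only [this, h1, h2, h3, if_true]
          cases List.findIdx? (· == '*') t <;> cases List.findIdx? (· == '[') t <;>
            simp [pvMinOpt]
        · by_cases h3 : h == '['
          · have : pvWild h = true := by simp [pvWild, h3]
            simp only [this, h1, h2, h3, if_true]
            cases List.findIdx? (· == '*') t <;> cases List.findIdx? (· == '?') t <;>
              simp [pvMinOpt]
          · have : pvWild h = false := by simp [pvWild, h1, h2, h3]
            simp only [this, h1, h2, h3, Bool.false_eq_true, if_false, ih]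
            cases List.findIdx? (· == '*') t <;> cases List.findIdx? (· == '?') t <;>
              cases List.findIdx? (· == '[') t <;>
              simp [pvMinOpt, Option.map]

theorem pv_ls_lt (cs : List Char) (j : Nat) (h : pvLastSlash cs = some j) :
    j < cs.length := by
  induction cs generalizing j with
  | nil => simp [pvLastSlash] at h
  | cons c t ih =>
      simp only [pvLastSlash] at h
      cases hls : pvLastSlash t with
      | some k =>
          rw [hls] at h
          simp at h
          have := ih k hls
          simp; omega
      | none =>
          rw [hls] at h
          by_cases hc : c == '/'
          · simp [hc] at h; simp; omega
          · simp [hc] at h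

theorem pv_pfx_cons (c : Char) (t : List Char) :
    pvPfx (c :: t) = if pvWild c then [] else c :: pvPfx t := by
  unfold pvPfx
  rw [List.findIdx?_cons]
  by_cases hw : pvWild c
  · simp [hw]
  · simp only [hw, if_false, Bool.false_eq_true]
    cases List.findIdx? pvWild t <;> simp

theorem pv_scan (cs : List Char) : ∀ (i last : Int),
    globScanGo cs i last =
      ((match pvLastSlash (pvPfx cs) with
        | some j => i + (j : Int)
        | none => last),
       (List.findIdx? pvWild cs).isSome) := by
  induction cs with
  | nil => intro i last; simp [globScanGo, pvPfx, pvLastSlash]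
  | cons c t ih =>
      intro i last
      rw [globScanGo, pv_pfx_cons]
      by_cases hw : pvWild c
      · have : (c == '*' || c == '?' || c == '[') = true := by
          simpa [pvWild] using hw
        simp [this, List.findIdx?_cons, hw, pvLastSlash]
      · have hw' : (c == '*' || c == '?' || c == '[') = false := by
          simpa [pvWild] using hw
        simp only [hw', Bool.false_eq_true, if_false, hw]
        rw [List.findIdx?_cons]
        simp only [hw, Bool.false_eq_true, if_false]
        by_cases hc : c == '/'
        · rw [if_pos hc, ih]
          simp only [pvLastSlash]
          cases pvLastSlash (pvPfx t) with
          | some j =>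
              simp only [Prod.mk.injEq]
              refine ⟨by push_cast; ring, ?_⟩
              cases List.findIdx? pvWild t <;> simp
          | none =>
              simp only [hc, if_true, Prod.mk.injEq]
              refine ⟨by simp, ?_⟩
              cases List.findIdx? pvWild t <;> simp
        · rw [if_neg (by simpa using hc), ih]
          simp only [pvLastSlash]
          cases pvLastSlash (pvPfx t) with
          | some j =>
              simp only [Prod.mk.injEq]
              refine ⟨by push_cast; ring, ?_⟩
              cases List.findIdx? pvWild t <;> simp
          | none =>
              simp only [hc, Bool.false_eq_true, if_false, Prod.mk.injEq]
              refine ⟨by trivial, ?_⟩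
              cases List.findIdx? pvWild t <;> simp

-- A's wildcard_positions list: empty iff no wildcard; its min is the first wildcard index
theorem pv_wpos_spec (pattern : String) :
    pvWildPositions pattern =
      ((match List.findIdx? (· == '*') pattern.toList with
         | some i => [(i : Int)] | none => []) ++
       (match List.findIdx? (· == '?') pattern.toList with
         | some i => [(i : Int)] | none => []) ++
       (match List.findIdx? (· == '[') pattern.toList with
         | some i => [(i : Int)] | none => [])) := by
  unfold pvWildPositions
  simp only [List.foldl, PySem.Str.find]
  have e1 : ("*" : String).toList = ['*'] := rfl
  have e2 : ("?" : String).toList = ['?'] := rfl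
  have e3 : ("[" : String).toList = ['['] := rfl
  rw [e1, e2, e3, pv_find_single, pv_find_single, pv_find_single]
  cases List.findIdx? (· == '*') pattern.toList <;>
    cases List.findIdx? (· == '?') pattern.toList <;>
    cases List.findIdx? (· == '[') pattern.toList <;>
    simp


theorem pv_min1 (a : Nat) :
    (PySem.List.min? [(a:Int)] (fun x => x)).getD 0 = (a : Int) := by
  simp [PySem.List.min?, List.foldl]

theorem pv_min2 (a b : Nat) :
    (PySem.List.min? [(a:Int), (b:Int)] (fun x => x)).getD 0 = ((min a b : Nat) : Int) := by
  simp [PySem.List.min?, List.foldl]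
  split_ifs <;> simp <;> omega

theorem pv_min3 (a b c : Nat) :
    (PySem.List.min? [(a:Int), (b:Int), (c:Int)] (fun x => x)).getD 0 = ((min (min a b) c : Nat) : Int) := by
  simp [PySem.List.min?, List.foldl]
  split_ifs <;> simp <;> (try (split_ifs <;> simp)) <;> omega

theorem pv_str_rfind (s : String) : PySem.Str.rfind s "/" = pvToInt (pvLastSlash s.toList) := by
  have h : ("/" : String).toList = ['/'] := rfl
  simp only [PySem.Str.rfind, h, pv_rfind_single]

theorem pv_slice_nat (s : String) (n : Nat) :
    PySem.Str.slice s none (some (n : Int)) = String.ofList (List.take n s.toList) := by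
  simp [PySem.Str.slice, PySem.Chars.slice, PySem.List.slice_to_natCast]

-- the whole claim in the case where a wildcard occurs, abstracted over the first wildcard index m
theorem pv_wild_finish (pattern : String) (m : Nat)
    (hne : pvWildPositions pattern ≠ [])
    (hgd : (PySem.List.min? (pvWildPositions pattern) (fun x => x)).getD 0 = (m : Int))
    (hfi : List.findIdx? pvWild pattern.toList = some m) :
    glob_listing_prefix pattern = glob_listing_prefix_alt pattern := by
  have hpfx : pvPfx pattern.toList = List.take m pattern.toList := by
    unfold pvPfx; rw [hfi]
  unfold glob_listing_prefix glob_listing_prefix_alt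
  simp only []
  rw [pv_scan, hfi, hpfx, if_neg hne, hgd, pv_slice_nat]
  have htl : (String.ofList (List.take m pattern.toList)).toList = List.take m pattern.toList := by
    simp
  have hrf : PySem.Str.rfind (String.ofList (List.take m pattern.toList)) "/"
      = pvToInt (pvLastSlash (List.take m pattern.toList)) := by
    rw [pv_str_rfind, htl]
  rw [hrf]
  cases hls : pvLastSlash (List.take m pattern.toList) with
  | none => simp [pvToInt]
  | some j =>
      have hj : j < (List.take m pattern.toList).length := pv_ls_lt _ _ hls
      have hjm : j + 1 ≤ m := by
        simp only [List.length_take] at hj; omega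
      simp only [pvToInt]
      rw [if_pos (by omega : (j : Int) ≥ 0), if_pos (by omega : (0 : Int) + (j : Int) ≥ 0)]
      have e1 : ((j : Int) + 1) = ((j + 1 : Nat) : Int) := by push_cast; ring
      have e2 : ((0 : Int) + (j : Int) + 1) = ((j + 1 : Nat) : Int) := by push_cast; ring
      rw [e1, e2, pv_slice_nat, pv_slice_nat, htl]
      rw [List.take_take, Nat.min_eq_left hjm]

-- ===== VERDICT (by name: the statement is the Claim_ definition above) =====
theorem glob_listing_prefix_spec : Claim_equal_glob_listing_prefix := by
  unfold Claim_equal_glob_listing_prefix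
  intro pattern _
  unfold Spec_glob_listing_prefix
  cases h1 : List.findIdx? (· == '*') pattern.toList with
  | some i1 =>
      cases h2 : List.findIdx? (· == '?') pattern.toList with
      | some i2 =>
          cases h3 : List.findIdx? (· == '[') pattern.toList with
          | some i3 =>
              apply pv_wild_finish pattern (min (min i1 i2) i3)
              · rw [pv_wpos_spec, h1, h2, h3]; simp
              · rw [pv_wpos_spec, h1, h2, h3]; exact pv_min3 i1 i2 i3
              · rw [pv_triple, h1, h2, h3]; simp [pvMinOpt]
          | none =>
              apply pv_wild_finish pattern (min i1 i2)
              · rw [pv_wpos_spec, h1, h2, h3]; simp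
              · rw [pv_wpos_spec, h1, h2, h3]; exact pv_min2 i1 i2
              · rw [pv_triple, h1, h2, h3]; simp [pvMinOpt]
      | none =>
          cases h3 : List.findIdx? (· == '[') pattern.toList with
          | some i3 =>
              apply pv_wild_finish pattern (min i1 i3)
              · rw [pv_wpos_spec, h1, h2, h3]; simp
              · rw [pv_wpos_spec, h1, h2, h3]; exact pv_min2 i1 i3
              · rw [pv_triple, h1, h2, h3]; simp [pvMinOpt]
          | none =>
              apply pv_wild_finish pattern i1
              · rw [pv_wpos_spec, h1, h2, h3]; simp
              · rw [pv_wpos_spec, h1, h2, h3]; exact pv_min1 i1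
              · rw [pv_triple, h1, h2, h3]; simp [pvMinOpt]
  | none =>
      cases h2 : List.findIdx? (· == '?') pattern.toList with
      | some i2 =>
          cases h3 : List.findIdx? (· == '[') pattern.toList with
          | some i3 =>
              apply pv_wild_finish pattern (min i2 i3)
              · rw [pv_wpos_spec, h1, h2, h3]; simp
              · rw [pv_wpos_spec, h1, h2, h3]; exact pv_min2 i2 i3
              · rw [pv_triple, h1, h2, h3]; simp [pvMinOpt]
          | none =>
              apply pv_wild_finish pattern i2
              · rw [pv_wpos_spec, h1, h2, h3]; simp
              · rw [pv_wpos_spec, h1, h2, h3]; exact pv_min1 i2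
              · rw [pv_triple, h1, h2, h3]; simp [pvMinOpt]
      | none =>
          cases h3 : List.findIdx? (· == '[') pattern.toList with
          | some i3 =>
              apply pv_wild_finish pattern i3
              · rw [pv_wpos_spec, h1, h2, h3]; simp
              · rw [pv_wpos_spec, h1, h2, h3]; exact pv_min1 i3
              · rw [pv_triple, h1, h2, h3]; simp [pvMinOpt]
          | none =>
              have hwp : pvWildPositions pattern = [] := by
                rw [pv_wpos_spec, h1, h2, h3]; simp
              have hfi : List.findIdx? pvWild pattern.toList = none := by
                rw [pv_triple, h1, h2, h3]; simp [pvMinOpt]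
              have hpfx : pvPfx pattern.toList = pattern.toList := by
                unfold pvPfx; rw [hfi]
              unfold glob_listing_prefix glob_listing_prefix_alt
              simp only []
              rw [pv_scan, hwp, hfi, hpfx, if_pos rfl, pv_str_rfind]
              cases hls : pvLastSlash pattern.toList with
              | none => simp [pvToInt]
              | some j =>
                  simp only [pvToInt]
                  rw [if_pos (by omega : (j : Int) ≥ 0),
                    if_pos (by omega : (0 : Int) + (j : Int) ≥ 0)]
                  have e : ((0 : Int) + (j : Int) + 1) = ((j : Int) + 1) := by ring
                  rw [e]
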